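-- pv_equiv track=rewrite | github.com/Khangvu345/Python_codePtit | PY01041-Số Tăng Giảm.py | so_tang_giam
-- ===== SOURCE A (Python) =====
-- def so_tang_giam(n):
--     if len(n) < 3 :
--         return "NO"
--     for i in range(1,len(n)-1):
--         left=True
--         for j in range(0,i):
--             if n[j] >= n[j+1]:
--                 left=False
--                 break
--         right=True
--         for j in range(i,len(n)-1):
--             if n[j] <= n[j+1]:
--                 right=False
--                 break
--         if left and right:
--             return "YES"
--     return "NO"
-- ===== SOURCE B (Python) =====
-- def so_tang_giam(n):
--     L = len(n)
--     p = 0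
--     while p + 1 < L and n[p] < n[p + 1]:
--         p += 1
--     if p == 0 or p >= L - 1:
--         return "NO"
--     j = p
--     while j + 1 < L:
--         if n[j] <= n[j + 1]:
--             return "NO"
--         j += 1
--     return "YES"
-- ===== Notes on version B (the rewrite author's own statement) =====
-- stated objective: faster
-- what changed: A tries every index i as a candidate peak and rescans the whole string left and right of it; B makes a single pass: it climbs to the end of the strictly increasing prefix and then checks a strict descent to the end.
import Mathlib
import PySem

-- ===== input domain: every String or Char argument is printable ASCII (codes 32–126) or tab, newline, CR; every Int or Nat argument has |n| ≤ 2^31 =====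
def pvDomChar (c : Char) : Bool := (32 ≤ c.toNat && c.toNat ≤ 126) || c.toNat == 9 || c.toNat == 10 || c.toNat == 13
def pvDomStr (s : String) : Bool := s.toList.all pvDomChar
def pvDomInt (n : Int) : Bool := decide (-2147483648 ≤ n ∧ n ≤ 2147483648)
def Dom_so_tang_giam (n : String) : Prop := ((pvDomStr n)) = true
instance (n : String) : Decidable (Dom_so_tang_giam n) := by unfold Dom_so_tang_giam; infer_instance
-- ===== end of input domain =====

-- B replaces A's scan over every candidate peak (each with two inner scans) by one linear pass:
-- climb to the end of the strictly increasing prefix, then check strict descent to the end.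
-- Loops are rendered as structural count-down recursion (d = number of iterations left).

-- ===== PORT A =====
-- inner loop 'for j in range(0,i)' with the left flag and break; d counts the iterations left (i - j)
def aLeftGo (L : List Char) (j : Nat) : Nat → Bool
  | 0 => true
  | d + 1 =>
    if L.getD j ' ' ≥ L.getD (j+1) ' ' then false
    else aLeftGo L (j+1) d

def aLeft (L : List Char) (i : Nat) (j : Nat) : Bool := aLeftGo L j (i - j)

-- inner loop 'for j in range(i,len(n)-1)' with the right flag and break; d = len-1-j iterations left
def aRightGo (L : List Char) (j : Nat) : Nat → Bool
  | 0 => true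
  | d + 1 =>
    if L.getD j ' ' ≤ L.getD (j+1) ' ' then false
    else aRightGo L (j+1) d

def aRight (L : List Char) (j : Nat) : Bool := aRightGo L j (L.length - 1 - j)

-- outer loop 'for i in range(1,len(n)-1)' with the early 'return "YES"'; d = len-1-i iterations left
def aMainGo (L : List Char) (i : Nat) : Nat → String
  | 0 => "NO"
  | d + 1 =>
    if aLeft L i 0 && aRight L i then "YES" else aMainGo L (i+1) d

def so_tang_giam (n : String) : String :=
  let L := n.toList
  if L.length < 3 then "NO" else aMainGo L 1 (L.length - 1 - 1)

-- ===== PORT B =====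
-- 'while p + 1 < L and n[p] < n[p+1]: p += 1'; d = len-1-p iterations left
def bClimbGo (L : List Char) (p : Nat) : Nat → Nat
  | 0 => p
  | d + 1 =>
    if L.getD p ' ' < L.getD (p+1) ' ' then bClimbGo L (p+1) d else p

def bClimb (L : List Char) (p : Nat) : Nat := bClimbGo L p (L.length - 1 - p)

-- 'while j + 1 < L: if n[j] <= n[j+1]: return "NO"; j += 1'; d = len-1-j iterations left
def bDescGo (L : List Char) (j : Nat) : Nat → Bool
  | 0 => true
  | d + 1 =>
    if L.getD j ' ' ≤ L.getD (j+1) ' ' then false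
    else bDescGo L (j+1) d

def bDesc (L : List Char) (j : Nat) : Bool := bDescGo L j (L.length - 1 - j)

def so_tang_giam_alt (n : String) : String :=
  let L := n.toList
  let p := bClimb L 0
  if p = 0 ∨ L.length - 1 ≤ p then "NO"
  else if bDesc L p then "YES" else "NO"

-- ===== PRECONDITION & SPEC =====
def Spec_so_tang_giam (n : String) (out : String) : Prop := out = so_tang_giam_alt n
instance (n : String) (out : String) : Decidable (Spec_so_tang_giam n out) := by unfold Spec_so_tang_giam; infer_instance

-- ===== CLAIM (what is proved, stated in full; the proofs are below) =====
def Claim_equal_so_tang_giam : Prop := ∀ (n : String), Dom_so_tang_giam n → Spec_so_tang_giam n (so_tang_giam n)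

-- ===== LEMMAS AND PROOFS =====

theorem aLeftGo_iff (L : List Char) (d : Nat) : ∀ j,
    aLeftGo L j d = true ↔ ∀ k, j ≤ k → k < j + d → L.getD k ' ' < L.getD (k+1) ' ' := by
  induction d with
  | zero =>
    intro j
    simp only [aLeftGo, true_iff]
    intro k hk hkd
    omega
  | succ d ih =>
    intro j
    rw [aLeftGo]
    split_ifs with hge
    · simp only [false_iff]
      intro h
      exact absurd (h j le_rfl (by omega)) (not_lt.mpr hge)
    · rw [ih (j+1)]
      constructor
      · intro h k hk hkd
        rcases Nat.eq_or_lt_of_le hk with rfl | hlt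
        · exact lt_of_not_ge hge
        · exact h k hlt (by omega)
      · intro h k hk hkd
        exact h k (by omega) (by omega)

theorem aLeft_iff (L : List Char) (i j : Nat) :
    aLeft L i j = true ↔ ∀ k, j ≤ k → k < i → L.getD k ' ' < L.getD (k+1) ' ' := by
  rw [aLeft, aLeftGo_iff]
  constructor
  · intro h k h1 h2
    exact h k h1 (by omega)
  · intro h k h1 h2
    exact h k h1 (by omega)

theorem aRightGo_iff (L : List Char) (d : Nat) : ∀ j,
    aRightGo L j d = true ↔ ∀ k, j ≤ k → k < j + d → L.getD (k+1) ' ' < L.getD k ' ' := by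
  induction d with
  | zero =>
    intro j
    simp only [aRightGo, true_iff]
    intro k hk hkd
    omega
  | succ d ih =>
    intro j
    rw [aRightGo]
    split_ifs with hle
    · simp only [false_iff]
      intro h
      exact absurd (h j le_rfl (by omega)) (not_lt.mpr hle)
    · rw [ih (j+1)]
      constructor
      · intro h k hk hkd
        rcases Nat.eq_or_lt_of_le hk with rfl | hlt
        · exact lt_of_not_ge hle
        · exact h k hlt (by omega)
      · intro h k hk hkd
        exact h k (by omega) (by omega)

theorem aRight_iff (L : List Char) (j : Nat) :
    aRight L j = true ↔ ∀ k, j ≤ k → k + 1 < L.length → L.getD (k+1) ' ' < L.getD k ' ' := by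
  rw [aRight, aRightGo_iff]
  constructor
  · intro h k h1 h2
    exact h k h1 (by omega)
  · intro h k h1 h2
    exact h k h1 (by omega)

theorem bDescGo_eq_aRightGo (L : List Char) (d : Nat) : ∀ j, bDescGo L j d = aRightGo L j d := by
  induction d with
  | zero => intro j; rfl
  | succ d ih =>
    intro j
    rw [bDescGo, aRightGo, ih (j+1)]

theorem bDesc_eq_aRight (L : List Char) (j : Nat) : bDesc L j = aRight L j := by
  rw [bDesc, aRight, bDescGo_eq_aRightGo]

theorem bClimbGo_inc (L : List Char) (d : Nat) : ∀ p k, p ≤ k → k < bClimbGo L p d →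
    L.getD k ' ' < L.getD (k+1) ' ' := by
  induction d with
  | zero =>
    intro p k hk hkc
    rw [bClimbGo] at hkc
    omega
  | succ d ih =>
    intro p k hk hkc
    rw [bClimbGo] at hkc
    split_ifs at hkc with hlt
    · rcases Nat.eq_or_lt_of_le hk with rfl | h
      · exact hlt
      · exact ih (p+1) k h hkc
    · omega

theorem bClimb_inc (L : List Char) (p : Nat) :
    ∀ k, p ≤ k → k < bClimb L p → L.getD k ' ' < L.getD (k+1) ' ' := by
  intro k hk hkc
  exact bClimbGo_inc L (L.length - 1 - p) p k hk hkc

theorem bClimbGo_pin (L : List Char) (i : Nat) (hilen : i < L.length)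
    (hstop : ¬ (i + 1 < L.length ∧ L.getD i ' ' < L.getD (i+1) ' ')) :
    ∀ d p, d = L.length - 1 - p → p ≤ i →
      (∀ k, p ≤ k → k < i → L.getD k ' ' < L.getD (k+1) ' ') → bClimbGo L p d = i := by
  intro d
  induction d with
  | zero =>
    intro p hd hpi hinc
    rw [bClimbGo]
    omega
  | succ d ih =>
    intro p hd hpi hinc
    rw [bClimbGo]
    split_ifs with hlt
    · have hpi' : p + 1 ≤ i := by
        rcases Nat.eq_or_lt_of_le hpi with rfl | h
        · exact absurd ⟨by omega, hlt⟩ hstop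
        · omega
      exact ih (p+1) (by omega) hpi' (fun k hk hki => hinc k (by omega) hki)
    · rcases Nat.eq_or_lt_of_le hpi with rfl | h
      · rfl
      · exact absurd (hinc p le_rfl h) hlt

theorem bClimb_pin (L : List Char) (i : Nat) (hilen : i < L.length)
    (hstop : ¬ (i + 1 < L.length ∧ L.getD i ' ' < L.getD (i+1) ' '))
    (hinc : ∀ k, k < i → L.getD k ' ' < L.getD (k+1) ' ') : bClimb L 0 = i := by
  rw [bClimb]
  exact bClimbGo_pin L i hilen hstop (L.length - 1 - 0) 0 rfl (Nat.zero_le i)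
    (fun k _ hki => hinc k hki)

theorem aMainGo_yes_iff (L : List Char) (d : Nat) : ∀ i, d = L.length - 1 - i →
    (aMainGo L i d = "YES" ↔
      ∃ m, i ≤ m ∧ m + 1 < L.length ∧ aLeft L m 0 = true ∧ aRight L m = true) := by
  induction d with
  | zero =>
    intro i hd
    rw [aMainGo]
    constructor
    · intro h; exact absurd h (by decide)
    · rintro ⟨m, him, hml, -, -⟩; omega
  | succ d ih =>
    intro i hd
    rw [aMainGo]
    split_ifs with h2
    · rw [Bool.and_eq_true] at h2
      simp only [true_iff]
      exact ⟨i, le_rfl, by omega, h2.1, h2.2⟩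
    · rw [ih (i+1) (by omega)]
      constructor
      · rintro ⟨m, him, hml, hl, hr⟩
        exact ⟨m, by omega, hml, hl, hr⟩
      · rintro ⟨m, him, hml, hl, hr⟩
        refine ⟨m, ?_, hml, hl, hr⟩
        rcases Nat.eq_or_lt_of_le him with rfl | h
        · exact absurd (by rw [Bool.and_eq_true]; exact ⟨hl, hr⟩) h2
        · exact h

theorem aMainGo_cases (L : List Char) (d : Nat) : ∀ i, aMainGo L i d = "YES" ∨ aMainGo L i d = "NO" := by
  induction d with
  | zero => intro i; exact Or.inr rfl
  | succ d ih =>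
    intro i
    rw [aMainGo]
    split_ifs with h2
    · exact Or.inl rfl
    · exact ih (i+1)

theorem core_eq (L : List Char) :
    (if L.length < 3 then "NO" else aMainGo L 1 (L.length - 1 - 1)) =
      (if bClimb L 0 = 0 ∨ L.length - 1 ≤ bClimb L 0 then "NO"
       else if bDesc L (bClimb L 0) then "YES" else "NO") := by
  set q := bClimb L 0 with hq
  by_cases hlen : L.length < 3
  · have hcond : q = 0 ∨ L.length - 1 ≤ q := by
      rcases Nat.eq_zero_or_pos q with h | h
      · exact Or.inl h
      · exact Or.inr (by omega)
    rw [if_pos hlen, if_pos hcond]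
  · have hlen3 : 3 ≤ L.length := by omega
    have hAB : aMainGo L 1 (L.length - 1 - 1) = "YES" ↔
        (¬ (q = 0 ∨ L.length - 1 ≤ q) ∧ bDesc L q = true) := by
      rw [aMainGo_yes_iff L (L.length - 1 - 1) 1 rfl]
      constructor
      · rintro ⟨m, h1m, hml, hl, hr⟩
        have hdec := (aRight_iff L m).mp hr
        have hstop : ¬ (m + 1 < L.length ∧ L.getD m ' ' < L.getD (m+1) ' ') := by
          rintro ⟨h1, h2⟩
          exact absurd h2 (not_lt.mpr (le_of_lt (hdec m le_rfl h1)))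
        have hinc : ∀ k, k < m → L.getD k ' ' < L.getD (k+1) ' ' := by
          intro k hk
          exact (aLeft_iff L m 0).mp hl k (Nat.zero_le k) hk
        have hqm : q = m := by
          rw [hq]
          exact bClimb_pin L m (by omega) hstop hinc
        constructor
        · rw [hqm]; push Not; exact ⟨by omega, by omega⟩
        · rw [hqm, bDesc_eq_aRight]; exact hr
      · rintro ⟨hcond, hd⟩
        push Not at hcond
        refine ⟨q, by omega, by omega, ?_, ?_⟩
        · rw [aLeft_iff]
          intro k _ hk
          exact bClimb_inc L 0 k (Nat.zero_le k) hk
        · rw [← bDesc_eq_aRight]; exact hd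
    rw [if_neg hlen]
    by_cases hcond : q = 0 ∨ L.length - 1 ≤ q
    · rw [if_pos hcond]
      rcases aMainGo_cases L (L.length - 1 - 1) 1 with h | h
      · exact absurd ((hAB.mp h).1) (not_not_intro hcond)
      · exact h
    · rw [if_neg hcond]
      by_cases hd : bDesc L q = true
      · rw [if_pos hd]
        exact hAB.mpr ⟨hcond, hd⟩
      · rw [if_neg hd]
        rcases aMainGo_cases L (L.length - 1 - 1) 1 with h | h
        · exact absurd (hAB.mp h).2 hd
        · exact h

-- ===== VERDICT (by name: the statement is the Claim_ definition above) =====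
theorem so_tang_giam_spec : Claim_equal_so_tang_giam := by
  intro n _
  unfold Spec_so_tang_giam so_tang_giam so_tang_giam_alt
  exact core_eq n.toList
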